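-- pv_equiv track=rewrite | github.com/JungYoonShin/Algorithm | 프로그래머스/LV.3/주사위고르기.py | solution
-- ===== SOURCE A (Python) =====
-- from itertools import combinations, product
-- from bisect import bisect_left
--
-- def solution(dice):
--     for i in dice:
--         i.sort()
--
--     # 가능한 주사위 조합
--     combi = list(combinations(range(len(dice)), len(dice) // 2))
--     not_combi = [tuple(set(range(len(dice))) - set(c)) for c in combi]
--
--     result = {}
--     for i in range(len(combi)):
--         case = combi[i]
--         n_case = not_combi[i]
--
--         dices = [dice[temp] for temp in case]
--         a_score_list = [sum(i) for i in product(*dices)]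
--
--         n_dices = [dice[temp] for temp in n_case]
--         b_score_list = [sum(i) for i in product(*n_dices)]
--         b_score_list.sort()
--
--         wins = sum(bisect_left(b_score_list, score) for score in a_score_list)
--
--         result[wins] = case
--
--     max_key = max(result.keys())
--
--     return [x+1 for x in result[max_key]]
-- ===== SOURCE B (Python) =====
-- from itertools import combinations
-- from bisect import bisect_left
--
-- def _dist(ds):
--     # sum-frequency distribution of one face from each die, by convolution
--     d = {0: 1}
--     for die in ds:
--         nd = {}
--         for s, c in d.items():
--             for f in die:
--                 nd[s + f] = nd.get(s + f, 0) + c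
--         d = nd
--     return d
--
-- def _count_wins(da, db):
--     # db's distinct sums in increasing order, with prefix sums of their frequencies
--     items = sorted(db.items())
--     keys = [s for s, _ in items]
--     prefix = [0]
--     for _, c in items:
--         prefix.append(prefix[-1] + c)
--     total = 0
--     for sa, ca in da.items():
--         total += ca * prefix[bisect_left(keys, sa)]
--     return total
--
-- def solution(dice):
--     n = len(dice)
--     best_wins, best = -1, ()
--     for case in combinations(range(n), n // 2):
--         rest = [i for i in range(n) if i not in case]
--         da = _dist([dice[i] for i in case])
--         db = _dist([dice[i] for i in rest])
--         wins = _count_wins(da, db)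
--         if wins >= best_wins:
--             best_wins, best = wins, case
--     return [i + 1 for i in best]
-- ===== Notes on version B (the rewrite author's own statement) =====
-- stated objective: alternative
-- what changed: Instead of materialising every face combination of each half (product lists), bisecting each of A's scores into the opponent's sorted score list and keying a dict by win count, B builds each half's sum-frequency distribution by dict convolution and counts winning pairs with prefix sums over the sorted distinct sums, keeping a running best split (same last-max tie-breaking as A's dict overwrite).
import Mathlib
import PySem

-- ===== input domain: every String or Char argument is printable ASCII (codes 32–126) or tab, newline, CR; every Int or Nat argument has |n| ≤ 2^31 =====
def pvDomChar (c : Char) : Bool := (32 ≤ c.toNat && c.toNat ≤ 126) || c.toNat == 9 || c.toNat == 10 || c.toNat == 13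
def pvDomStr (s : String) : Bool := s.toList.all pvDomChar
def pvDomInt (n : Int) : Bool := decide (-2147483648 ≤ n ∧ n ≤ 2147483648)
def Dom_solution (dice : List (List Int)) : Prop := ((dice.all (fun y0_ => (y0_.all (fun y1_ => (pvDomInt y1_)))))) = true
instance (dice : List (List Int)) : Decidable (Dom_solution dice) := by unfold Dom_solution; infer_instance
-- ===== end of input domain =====

-- B replaces A's brute-force enumeration of all face combinations per split by convolved
-- sum-frequency dictionaries and counts winning pairs via prefix sums over the distinct sums
-- (objective: alternative algorithm of comparable cost).
-- Note: Python A sorts each die in place (i.sort()); the equivalence proved here is about the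
-- RETURN value only (the sums counted are invariant under reordering faces).

-- ===== PORT A =====

-- itertools.product(*dices): first factor varies slowest, as in CPython
def pyProduct (ds : List (List Int)) : List (List Int) :=
  match ds with
  | [] => [[]]
  | d :: rest => d.flatMap (fun x => (pyProduct rest).map (fun t => x :: t))

def solution (dice : List (List Int)) : List Int :=
  -- for i in dice: i.sort()   (return-value port: the sorted dice are what the rest reads)
  let dice2 := dice.map (fun d => PySem.List.sorted d (fun x => x) false)
  let n := dice2.length
  let combi := PySem.List.combinations (List.range n) (n / 2)
  -- tuple(set(range(n)) - set(c)): ascending order; exact for the result, which consumes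
  -- n_case only through a commutative sum of scores
  let not_combi := combi.map (fun c => (List.range n).filter (fun j => decide (j ∉ c)))
  let result : PySem.Dict Int (List Nat) :=
    (List.range combi.length).foldl (fun result i =>
      let case := combi.getD i []
      let n_case := not_combi.getD i []
      -- dice[temp]: temp < n always, so getD is exact here
      let dices := case.map (fun t => dice2.getD t [])
      let a_score_list := (pyProduct dices).map List.sum
      let n_dices := n_case.map (fun t => dice2.getD t [])
      let b_score_list := PySem.List.sorted ((pyProduct n_dices).map List.sum) (fun x => x) false
      let wins : Int := (a_score_list.map (fun s => (PySem.List.bisectLeft b_score_list s : Int))).sum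
      result.insert wins case) PySem.Dict.empty
  -- max(result.keys()); result nonempty since combinations(range n, n/2) is nonempty,
  -- so the none branches are unreachable totality guards
  match PySem.List.max? result.keys (fun x => x) with
  | none => []
  | some mk =>
    match result.get? mk with
    | none => []
    | some case => case.map (fun x => (x : Int) + 1)

-- ===== PORT B =====

-- one convolution step of _dist: nd[s+f] = nd.get(s+f, 0) + c
def convolve (d : PySem.Dict Int Int) (die : List Int) : PySem.Dict Int Int :=
  d.items.foldl
    (fun nd p => die.foldl (fun nd f => nd.modify (p.1 + f) 0 (fun x => x + p.2)) nd)
    PySem.Dict.empty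

def distOf (ds : List (List Int)) : PySem.Dict Int Int :=
  ds.foldl convolve (PySem.Dict.empty.insert 0 1)

-- sorted(db.items()): dict keys are unique, so Python's lexicographic tuple sort
-- coincides with sorting by the key component (exact here)
def countWins (da db : PySem.Dict Int Int) : Int :=
  let items := PySem.List.sorted db.items (fun p => p.1) false
  let keys := items.map (fun p => p.1)
  let pre := items.foldl (fun pr p => pr ++ [PySem.List.pyGetD pr (-1) 0 + p.2]) [(0 : Int)]
  da.items.foldl
    (fun t pa => t + pa.2 * PySem.List.pyGetD pre ((PySem.List.bisectLeft keys pa.1 : Nat) : Int) 0)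
    0

def solution_alt (dice : List (List Int)) : List Int :=
  let n := dice.length
  let best := (PySem.List.combinations (List.range n) (n / 2)).foldl
    (fun (best : Int × List Nat) case =>
      let rest := (List.range n).filter (fun i => decide (i ∉ case))
      let da := distOf (case.map (fun i => dice.getD i []))
      let db := distOf (rest.map (fun i => dice.getD i []))
      let wins := countWins da db
      if wins ≥ best.1 then (wins, case) else best)
    ((-1 : Int), ([] : List Nat))
  best.2.map (fun i => (i : Int) + 1)

-- ===== PRECONDITION & SPEC =====
def Spec_solution (dice : List (List Int)) (out : List Int) : Prop := out = solution_alt dice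
instance (dice : List (List Int)) (out : List Int) : Decidable (Spec_solution dice out) := by unfold Spec_solution; infer_instance

-- ===== CLAIM (what is proved, stated in full; the proofs are below) =====
def Claim_equal_solution : Prop := ∀ (dice : List (List Int)), Dom_solution dice → Spec_solution dice (solution dice)

-- ===== LEMMAS AND PROOFS =====

def sumsOf (ds : List (List Int)) : List Int := (pyProduct ds).map List.sum

def mixL (L : List Int) (ds : List (List Int)) : List Int :=
  L.flatMap (fun l => (sumsOf ds).map (fun s => l + s))

/-- the dict `d` is the sum-frequency distribution of the multiset `xs` -/
def DistOK (d : PySem.Dict Int Int) (xs : List Int) : Prop :=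
  d.keys.Nodup ∧ (∀ v : Int, d.getD v 0 = (xs.count v : Int)) ∧ (∀ v : Int, v ∈ d.keys ↔ v ∈ xs)

lemma sum_ite_mem (K : List Int) (x : Int) (g : Int → Int) (hnd : K.Nodup) (hx : x ∈ K) :
    (K.map (fun k => if k = x then g k else 0)).sum = g x := by
  induction K with
  | nil => cases hx
  | cons k K ih =>
    rcases List.nodup_cons.mp hnd with ⟨hk, hnd'⟩
    rcases List.mem_cons.mp hx with rfl | hx'
    · simp only [List.map_cons, List.sum_cons]
      have : (K.map (fun j => if j = x then g j else 0)).sum = 0 := by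
        apply List.sum_eq_zero
        intro y hy
        rcases List.mem_map.mp hy with ⟨j, hj, rfl⟩
        have : j ≠ x := fun h => hk (h ▸ hj)
        simp [this]
      simp [this]
    · have hkx : k ≠ x := fun h => hk (h ▸ hx')
      simp only [List.map_cons, List.sum_cons, if_neg hkx, zero_add]
      exact ih hnd' hx'

lemma group_sum (xs K : List Int) (g : Int → Int) (hnd : K.Nodup) (hcov : ∀ v ∈ xs, v ∈ K) :
    (K.map (fun k => (xs.count k : Int) * g k)).sum = (xs.map g).sum := by
  induction xs with
  | nil => simp
  | cons x t ih =>
    have hcov' : ∀ v ∈ t, v ∈ K := fun v hv => hcov v (List.mem_cons_of_mem _ hv)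
    have hx : x ∈ K := hcov x (List.mem_cons_self)
    have step : ∀ k : Int, (((x :: t).count k : Nat) : Int) * g k
        = (t.count k : Int) * g k + (if k = x then g k else 0) := by
      intro k
      by_cases hkx : k = x
      · subst hkx; simp [List.count_cons_self]; ring
      · rw [List.count_cons_of_ne (Ne.symm hkx)]; simp [hkx]
    calc (K.map (fun k => ((x :: t).count k : Int) * g k)).sum
        = (K.map (fun k => (t.count k : Int) * g k + (if k = x then g k else 0))).sum := by
          exact congrArg List.sum (List.map_congr_left (fun k _ => step k))
      _ = (K.map (fun k => (t.count k : Int) * g k)).sum + (K.map (fun k => if k = x then g k else 0)).sum :=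
          PySem.List.sum_map_add_int K _ _
      _ = (t.map g).sum + g x := by rw [ih hcov', sum_ite_mem K x g hnd hx]
      _ = ((x :: t).map g).sum := by simp [List.map_cons, List.sum_cons]; ring

lemma dict_sum (d : PySem.Dict Int Int) (xs : List Int) (g : Int → Int)
    (h : DistOK d xs) :
    (d.items.map (fun p => p.2 * g p.1)).sum = (xs.map g).sum := by
  obtain ⟨hnd, hc, hcov⟩ := h
  have h1 : d.items.map (fun p => p.2 * g p.1) = d.items.map (fun p => (xs.count p.1 : Int) * g p.1) := by
    apply List.map_congr_left
    intro p hp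
    have : d.getD p.1 0 = p.2 := PySem.Dict.getD_of_mem_items d (by simpa using hp) hnd 0
    rw [← this, hc p.1]
  have h2 : d.items.map (fun p => (xs.count p.1 : Int) * g p.1)
      = d.keys.map (fun k => (xs.count k : Int) * g k) := by
    simp only [PySem.Dict.keys, List.map_map]
    rfl
  rw [h1, h2]
  exact group_sum xs d.keys g hnd (fun v hv => (hcov v).mpr hv)

lemma conv_inner_getD (die : List Int) (s c v : Int) :
    ∀ (nd : PySem.Dict Int Int),
      ((die.foldl (fun nd f => nd.modify (s + f) 0 (fun x => x + c)) nd).getD v 0)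
        = nd.getD v 0 + c * (die.count (v - s) : Int) := by
  induction die with
  | nil => intro nd; simp
  | cons f die ih =>
    intro nd
    rw [List.foldl_cons, ih]
    by_cases hv : v = s + f
    · have hfs : v - s = f := by omega
      rw [PySem.Dict.getD_modify]
      simp [hv, List.count_cons_self]
      ring
    · have hfs : v - s ≠ f := by omega
      rw [PySem.Dict.getD_modify]
      rw [List.count_cons_of_ne (Ne.symm hfs)]
      simp [hv]

lemma conv_outer_getD (die : List Int) (v : Int) :
    ∀ (ps : List (Int × Int)) (nd : PySem.Dict Int Int),
      ((ps.foldl (fun nd p => die.foldl (fun nd f => nd.modify (p.1 + f) 0 (fun x => x + p.2)) nd) nd).getD v 0)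
        = nd.getD v 0 + (ps.map (fun p => p.2 * (die.count (v - p.1) : Int))).sum := by
  intro ps
  induction ps with
  | nil => intro nd; simp
  | cons p ps ih =>
    intro nd
    rw [List.foldl_cons, ih, conv_inner_getD]
    simp only [List.map_cons, List.sum_cons]
    ring

lemma conv_getD (d : PySem.Dict Int Int) (die : List Int) (v : Int) :
    (convolve d die).getD v 0 = (d.items.map (fun p => p.2 * (die.count (v - p.1) : Int))).sum := by
  unfold convolve
  rw [conv_outer_getD]
  simp

lemma conv_keys (d : PySem.Dict Int Int) (die : List Int) :
    (convolve d die).keys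
      = PySem.Set.ofList (d.items.flatMap (fun p => die.map (fun f => p.1 + f))) := by
  have outer : ∀ (ps : List (Int × Int)) (nd : PySem.Dict Int Int),
      (ps.foldl (fun nd p => die.foldl (fun nd f => nd.modify (p.1 + f) 0 (fun x => x + p.2)) nd) nd).keys
        = PySem.Set.update nd.keys (ps.flatMap (fun p => die.map (fun f => p.1 + f))) := by
    intro ps
    induction ps with
    | nil => intro nd; simp [PySem.Set.update_nil]
    | cons p ps ih =>
      intro nd
      rw [List.foldl_cons, ih, List.flatMap_cons, PySem.Set.update_append,
        PySem.Dict.keys_foldl_modify_key die (fun f => p.1 + f) 0 (fun nd f x => x + p.2) nd]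
  unfold convolve
  rw [outer]
  simp [PySem.Set.update_nil_left, PySem.Dict.keys_empty]

lemma count_shift (die : List Int) (l v : Int) :
    (die.map (fun f => l + f)).count v = die.count (v - l) := by
  have h1 : (die.map (fun f => l + f)).count v = die.countP (fun f => l + f == v) := by
    rw [List.count, List.countP_map]
    rfl
  have h2 : die.count (v - l) = die.countP (fun f => f == v - l) := rfl
  rw [h1, h2]
  apply List.countP_congr
  intro f _
  constructor <;> (intro h; simp only [beq_iff_eq] at *; omega)

lemma count_flatMap_shift (L : List Int) (die : List Int) (v : Int) :
    (((L.flatMap (fun l => die.map (fun f => l + f))).count v : Int))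
      = (L.map (fun l => (die.count (v - l) : Int))).sum := by
  induction L with
  | nil => simp
  | cons l L ih =>
    rw [List.flatMap_cons, List.count_append, List.map_cons, List.sum_cons, ← ih, count_shift]
    push_cast
    ring

lemma conv_preserves {d : PySem.Dict Int Int} {L : List Int} (die : List Int) (h : DistOK d L) :
    DistOK (convolve d die) (L.flatMap (fun l => die.map (fun f => l + f))) := by
  obtain ⟨hnd, hc, hm⟩ := h
  refine ⟨?_, ?_, ?_⟩
  · rw [conv_keys]; exact PySem.Set.nodup_ofList _
  · intro v
    rw [conv_getD, count_flatMap_shift,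
      dict_sum d L (fun s => (die.count (v - s) : Int)) ⟨hnd, hc, hm⟩]
  · intro v
    rw [conv_keys]
    rw [PySem.Set.mem_ofList]
    simp only [List.mem_flatMap, List.mem_map]
    constructor
    · rintro ⟨p, hp, f, hf, rfl⟩
      have hp1 : p.1 ∈ L := by
        apply (hm p.1).mp
        simp only [PySem.Dict.keys]
        exact List.mem_map.mpr ⟨p, hp, rfl⟩
      exact ⟨p.1, hp1, f, hf, rfl⟩
    · rintro ⟨l, hl, f, hf, rfl⟩
      have : l ∈ d.keys := (hm l).mpr hl
      simp only [PySem.Dict.keys, List.mem_map] at this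
      obtain ⟨p, hp, rfl⟩ := this
      exact ⟨p, hp, f, hf, rfl⟩

lemma sumsOf_cons (die : List Int) (ds : List (List Int)) :
    sumsOf (die :: ds) = die.flatMap (fun f => (sumsOf ds).map (fun t => f + t)) := by
  have hp : pyProduct (die :: ds) = die.flatMap (fun x => (pyProduct ds).map (fun t => x :: t)) := rfl
  unfold sumsOf
  rw [hp, List.map_flatMap]
  apply List.flatMap_congr
  intro x _
  rw [List.map_map, List.map_map]
  apply List.map_congr_left
  intro t _
  simp

lemma mixL_step (L : List Int) (die : List Int) (ds : List (List Int)) :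
    mixL L (die :: ds) = mixL (L.flatMap (fun l => die.map (fun f => l + f))) ds := by
  unfold mixL
  rw [sumsOf_cons]
  simp only [List.flatMap_assoc, List.flatMap_map, List.map_flatMap, List.map_map,
    Function.comp_def, add_assoc]

lemma dist_fold (ds : List (List Int)) :
    ∀ (d : PySem.Dict Int Int) (L : List Int), DistOK d L → DistOK (ds.foldl convolve d) (mixL L ds) := by
  induction ds with
  | nil =>
    intro d L h
    have : mixL L [] = L := by
      unfold mixL sumsOf pyProduct
      simp
    rw [List.foldl_nil, this]
    exact h
  | cons die ds ih =>
    intro d L h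
    rw [List.foldl_cons, mixL_step]
    exact ih _ _ (conv_preserves die h)

lemma distOf_spec (ds : List (List Int)) : DistOK (distOf ds) (sumsOf ds) := by
  have h0 : DistOK (PySem.Dict.empty.insert 0 1) [0] := by
    refine ⟨?_, ?_, ?_⟩
    · decide
    · intro v
      by_cases hv : v = (0 : Int)
      · subst hv; decide
      · rw [PySem.Dict.getD_insert]
        simp only [hv, if_false, PySem.Dict.getD_empty, List.count_singleton]
        have : ¬((0:Int) = v) := fun h => hv h.symm
        simp [this]
    · have hk : (PySem.Dict.empty.insert (0:Int) (1:Int)).keys = [0] := by decide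
      intro v
      rw [hk]
  have := dist_fold ds _ _ h0
  have hm : mixL [0] ds = sumsOf ds := by
    unfold mixL
    simp
  rw [hm] at this
  exact this

lemma sum_ite_filter (l : List (Int × Int)) (sa : Int) :
    (l.map (fun p => if p.1 < sa then p.2 else 0)).sum
      = ((l.filter (fun p => decide (p.1 < sa))).map (fun p => p.2)).sum := by
  induction l with
  | nil => simp
  | cons p l ih =>
    by_cases h : p.1 < sa
    · simp [h, ih]
    · simp [h, ih]

lemma prefix_spec (items : List (Int × Int)) :
    items.foldl (fun pr p => pr ++ [PySem.List.pyGetD pr (-1) 0 + p.2]) [(0 : Int)]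
      = (List.range (items.length + 1)).map (fun i => ((items.take i).map (fun p => p.2)).sum) := by
  induction items using List.reverseRecOn with
  | nil => simp
  | append_singleton l p ih =>
    rw [List.foldl_append, List.foldl_cons, List.foldl_nil, ih]
    have hsplit : (List.range (l.length + 1)).map (fun i => ((l.take i).map (fun q => q.2)).sum)
        = (List.range l.length).map (fun i => ((l.take i).map (fun q => q.2)).sum)
          ++ [(l.map (fun q => q.2)).sum] := by
      rw [List.range_succ, List.map_append, List.map_singleton, List.take_length]
    have hlast : PySem.List.pyGetD
        ((List.range (l.length + 1)).map (fun i => ((l.take i).map (fun q => q.2)).sum)) (-1) 0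
        = (l.map (fun q => q.2)).sum := by
      rw [hsplit, PySem.List.pyGetD_neg_one_append_singleton]
    rw [hlast, List.length_append, List.length_singleton]
    conv_rhs => rw [List.range_succ, List.map_append]
    congr 1
    · apply List.map_congr_left
      intro i hi
      have hle : i ≤ l.length := Nat.lt_succ_iff.mp (List.mem_range.mp hi)
      rw [List.take_append_of_le_length hle]
    · have hfull : (l ++ [p]).take (l.length + 1) = l ++ [p] :=
        List.take_of_length_le (by simp)
      simp [hfull]

lemma prefix_lookup (db : PySem.Dict Int Int) (B : List Int) (hb : DistOK db B) (sa : Int) :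
    PySem.List.pyGetD
      ((PySem.List.sorted db.items (fun p => p.1) false).foldl
        (fun pr p => pr ++ [PySem.List.pyGetD pr (-1) 0 + p.2]) [(0 : Int)])
      ((PySem.List.bisectLeft ((PySem.List.sorted db.items (fun p => p.1) false).map (fun p => p.1)) sa : Nat) : Int) 0
      = (B.countP (fun y => y < sa) : Int) := by
  set items := PySem.List.sorted db.items (fun p => p.1) false with hitems
  have hpw : (items.map (fun p => p.1)).Pairwise (· ≤ ·) :=
    PySem.List.sorted_map_key_pairwise db.items (fun p => p.1)
  obtain ⟨hk, hlt, hge⟩ := PySem.List.bisectLeft_spec (items.map (fun p => p.1)) sa hpw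
  set m := PySem.List.bisectLeft (items.map (fun p => p.1)) sa with hm
  have hmlen : m ≤ items.length := by simpa using hk
  rw [prefix_spec, PySem.List.pyGetD_natCast]
  have hlen : ((List.range (items.length + 1)).map (fun i => ((items.take i).map (fun p => p.2)).sum)).getD m 0
      = ((items.take m).map (fun p => p.2)).sum := by
    rw [List.getD_eq_getElem?_getD, List.getElem?_map, List.getElem?_range (by omega)]
    rfl
  rw [hlen]
  have htake : ((items.filter (fun p => decide (p.1 < sa))).map (fun p => p.2)).sum
      = ((items.take m).map (fun p => p.2)).sum := by
    conv_lhs => rw [← List.take_append_drop m items]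
    rw [List.filter_append]
    have h1 : (items.take m).filter (fun p => decide (p.1 < sa)) = items.take m := by
      apply List.filter_eq_self.mpr
      intro p hp
      rcases List.mem_take_iff_getElem.mp hp with ⟨j, hj, rfl⟩
      have hj1 : j < m := (lt_min_iff.mp hj).1
      have hj2 : j < items.length := (lt_min_iff.mp hj).2
      have hj3 : j < (items.map (fun p => p.1)).length := by simpa using hj2
      have := hlt j hj3 hj1
      rw [List.getElem_map] at this
      exact decide_eq_true this
    have h2 : (items.drop m).filter (fun p => decide (p.1 < sa)) = [] := by
      rw [List.filter_eq_nil_iff]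
      intro p hp
      rcases List.mem_drop_iff_getElem.mp hp with ⟨j, hj, rfl⟩
      have hj' : j + m < items.length := hj
      have hj3 : m + j < (items.map (fun p => p.1)).length := by
        simp only [List.length_map]
        omega
      have := hge (m + j) hj3 (by omega)
      rw [List.getElem_map] at this
      simp only [decide_eq_true_eq]
      omega
    rw [h1, h2, List.append_nil]
  rw [← htake, ← sum_ite_filter]
  have hperm : (items.map (fun p => if p.1 < sa then p.2 else 0)).sum
      = (db.items.map (fun p => if p.1 < sa then p.2 else 0)).sum :=
    List.Perm.sum_eq ((PySem.List.sorted_perm db.items (fun p => p.1) false).map _)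
  rw [hperm]
  have hmul : db.items.map (fun p => if p.1 < sa then p.2 else 0)
      = db.items.map (fun p => p.2 * (if p.1 < sa then 1 else 0)) := by
    apply List.map_congr_left
    intro p _
    split <;> ring
  rw [hmul, dict_sum db B (fun s => if s < sa then 1 else 0) hb]
  have h3 : B.map (fun s => if s < sa then 1 else 0)
      = B.map (fun s => if decide (s < sa) = true then (1 : Int) else 0) := by
    simp
  rw [h3, PySem.List.sum_map_ite_one_zero]

lemma countWins_eq (da db : PySem.Dict Int Int) (A B : List Int)
    (ha : DistOK da A) (hb : DistOK db B) :
    countWins da db = (A.map (fun a => ((B.countP (fun y => y < a)) : Int))).sum := by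
  simp only [countWins]
  rw [PySem.List.foldl_add, zero_add]
  have hcongr : da.items.map (fun pa => pa.2 * PySem.List.pyGetD
        ((PySem.List.sorted db.items (fun p => p.1) false).foldl
          (fun pr p => pr ++ [PySem.List.pyGetD pr (-1) 0 + p.2]) [(0 : Int)])
        ((PySem.List.bisectLeft ((PySem.List.sorted db.items (fun p => p.1) false).map (fun p => p.1)) pa.1 : Nat) : Int) 0)
      = da.items.map (fun pa => pa.2 * ((B.countP (fun y => y < pa.1)) : Int)) := by
    apply List.map_congr_left
    intro pa _
    rw [prefix_lookup db B hb pa.1]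
  rw [hcongr, dict_sum da A (fun s => ((B.countP (fun y => y < s)) : Int)) ha]

lemma countWins_nonneg (da db : PySem.Dict Int Int) (A B : List Int)
    (ha : DistOK da A) (hb : DistOK db B) : 0 ≤ countWins da db := by
  rw [countWins_eq da db A B ha hb]
  apply List.sum_nonneg
  intro x hx
  rcases List.mem_map.mp hx with ⟨a, _, rfl⟩
  positivity

lemma bisectLeft_eq_countP (xs : List Int) (x : Int) (h : xs.Pairwise (· ≤ ·)) :
    PySem.List.bisectLeft xs x = xs.countP (fun y => y < x) := by
  obtain ⟨hk, hlt, hge⟩ := PySem.List.bisectLeft_spec xs x h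
  set k := PySem.List.bisectLeft xs x with hkdef
  have hsplit : xs = xs.take k ++ xs.drop k := (List.take_append_drop k xs).symm
  have htake : (xs.take k).countP (fun y => decide (y < x)) = k := by
    have hall : ∀ a ∈ xs.take k, (fun y => decide (y < x)) a = true := by
      intro a ha
      rcases List.mem_take_iff_getElem.mp ha with ⟨j, hj, rfl⟩
      have hj1 : j < k := (lt_min_iff.mp hj).1
      have hj2 : j < xs.length := (lt_min_iff.mp hj).2
      exact decide_eq_true (hlt j hj2 hj1)
    rw [List.countP_eq_length.mpr hall, List.length_take]
    omega
  have hdrop : (xs.drop k).countP (fun y => decide (y < x)) = 0 := by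
    rw [List.countP_eq_zero]
    intro a ha
    rcases List.mem_drop_iff_getElem.mp ha with ⟨j, hj, rfl⟩
    have := hge (k + j) (by omega) (by omega)
    simp only [decide_eq_true_eq]
    omega
  have hfin : xs.countP (fun y => decide (y < x)) = k := by
    conv_lhs => rw [hsplit]
    rw [List.countP_append, htake, hdrop]
    omega
  exact hfin.symm

lemma sumsOf_perm {ds ds' : List (List Int)} (h : List.Forall₂ List.Perm ds ds') :
    (sumsOf ds).Perm (sumsOf ds') := by
  induction h with
  | nil => exact List.Perm.refl _
  | cons hd htl ih =>
    rw [sumsOf_cons, sumsOf_cons]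
    exact List.Perm.flatMap hd (fun f _ => ih.map _)

lemma getD_map_sorted (dice : List (List Int)) (t : Nat) :
    ((dice.map (fun d => PySem.List.sorted d (fun x => x) false)).getD t []).Perm (dice.getD t []) := by
  rw [List.getD_eq_getElem?_getD, List.getD_eq_getElem?_getD, List.getElem?_map]
  by_cases ht : t < dice.length
  · rw [List.getElem?_eq_getElem ht]
    simpa using PySem.List.sorted_perm dice[t] (fun x => x) false
  · rw [List.getElem?_eq_none (by omega)]
    simp

/-- per-split wins: A's bisect-sum over raw score lists equals B's distribution count -/
lemma wins_eq (dice : List (List Int)) (case rest : List Nat) :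
    ((((pyProduct (case.map (fun t => (dice.map (fun d => PySem.List.sorted d (fun x => x) false)).getD t []))).map List.sum).map
        (fun s => (PySem.List.bisectLeft
            (PySem.List.sorted ((pyProduct (rest.map (fun t => (dice.map (fun d => PySem.List.sorted d (fun x => x) false)).getD t []))).map List.sum) (fun x => x) false)
            s : Int))).sum)
      = countWins (distOf (case.map (fun i => dice.getD i [])))
          (distOf (rest.map (fun i => dice.getD i []))) := by
  have hperm : ∀ (c : List Nat),
      List.Forall₂ List.Perm
        (c.map (fun t => (dice.map (fun d => PySem.List.sorted d (fun x => x) false)).getD t []))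
        (c.map (fun t => dice.getD t [])) := by
    intro c
    induction c with
    | nil => exact List.Forall₂.nil
    | cons t c ih => exact List.Forall₂.cons (getD_map_sorted dice t) ih
  have hA := sumsOf_perm (hperm case)
  have hB := sumsOf_perm (hperm rest)
  rw [countWins_eq _ _ (sumsOf (case.map (fun i => dice.getD i [])))
    (sumsOf (rest.map (fun i => dice.getD i []))) (distOf_spec _) (distOf_spec _)]
  have hpw := PySem.List.sorted_pairwise
    (sumsOf (rest.map (fun t => (dice.map (fun d => PySem.List.sorted d (fun x => x) false)).getD t [])))
    (fun x => x)
  have hmap : (sumsOf (case.map (fun t => (dice.map (fun d => PySem.List.sorted d (fun x => x) false)).getD t []))).map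
        (fun s => (PySem.List.bisectLeft (PySem.List.sorted (sumsOf (rest.map (fun t => (dice.map (fun d => PySem.List.sorted d (fun x => x) false)).getD t []))) (fun x => x) false) s : Int))
      = (sumsOf (case.map (fun t => (dice.map (fun d => PySem.List.sorted d (fun x => x) false)).getD t []))).map
        (fun s => ((sumsOf (rest.map (fun i => dice.getD i []))).countP (fun y => y < s) : Int)) := by
    apply List.map_congr_left
    intro a _
    rw [bisectLeft_eq_countP _ _ hpw]
    congr 1
    rw [List.Perm.countP_eq _ (PySem.List.sorted_perm _ _ _)]
    exact List.Perm.countP_eq _ hB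
  unfold sumsOf at hmap hA ⊢
  rw [hmap]
  exact List.Perm.sum_eq (hA.map _)

/-- invariant linking A's result dict with B's running best -/
def GoodSel (d : PySem.Dict Int (List Nat)) (bw : Int) (b : List Nat) : Prop :=
  (d = PySem.Dict.empty ∧ bw = -1 ∧ b = [])
  ∨ (d.keys.Nodup ∧ bw ∈ d.keys ∧ (∀ y ∈ d.keys, y ≤ bw) ∧ d.get? bw = some b)

lemma sel_step (d : PySem.Dict Int (List Nat)) (bw : Int) (b : List Nat) (w : Int) (c : List Nat)
    (hw : 0 ≤ w) (h : GoodSel d bw b) :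
    GoodSel (d.insert w c) (if w ≥ bw then w else bw) (if w ≥ bw then c else b) := by
  rcases h with ⟨rfl, rfl, rfl⟩ | ⟨hnd, hbw, hmax, hget⟩
  · have hge : w ≥ (-1 : Int) := by omega
    rw [if_pos hge, if_pos hge]
    right
    refine ⟨?_, ?_, ?_, ?_⟩
    · exact PySem.Dict.nodup_keys_insert _ _ _ (by simp [PySem.Dict.keys_empty])
    · simp [PySem.Dict.mem_keys_insert _ _ _ _]
    · intro y hy
      rcases (PySem.Dict.mem_keys_insert _ _ _ _).mp hy with rfl | hy'
      · exact le_refl _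
      · simp [PySem.Dict.keys_empty] at hy'
    · exact PySem.Dict.get?_insert_self _ _ _
  · by_cases hge : w ≥ bw
    · rw [if_pos hge, if_pos hge]
      right
      refine ⟨PySem.Dict.nodup_keys_insert _ _ _ hnd, ?_, ?_, PySem.Dict.get?_insert_self _ _ _⟩
      · simp [PySem.Dict.mem_keys_insert _ _ _ _]
      · intro y hy
        rcases (PySem.Dict.mem_keys_insert _ _ _ _).mp hy with rfl | hy'
        · exact le_refl _
        · exact le_trans (hmax y hy') hge
    · rw [if_neg hge, if_neg hge]
      right
      have hne : bw ≠ w := by omega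
      refine ⟨PySem.Dict.nodup_keys_insert _ _ _ hnd, ?_, ?_, ?_⟩
      · exact (PySem.Dict.mem_keys_insert _ _ _ _).mpr (Or.inr hbw)
      · intro y hy
        rcases (PySem.Dict.mem_keys_insert _ _ _ _).mp hy with rfl | hy'
        · omega
        · exact hmax y hy'
      · rw [PySem.Dict.get?_insert_of_ne _ _ hne]
        exact hget

lemma sel_fold (ps : List (Int × List Nat)) :
    ∀ (d : PySem.Dict Int (List Nat)) (p : Int × List Nat), GoodSel d p.1 p.2 → (∀ q ∈ ps, 0 ≤ q.1) →
      GoodSel (ps.foldl (fun d q => d.insert q.1 q.2) d)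
        (ps.foldl (fun p q => if q.1 ≥ p.1 then q else p) p).1
        (ps.foldl (fun p q => if q.1 ≥ p.1 then q else p) p).2 := by
  induction ps with
  | nil => intro d p h _; exact h
  | cons q ps ih =>
    intro d p h hpos
    rw [List.foldl_cons, List.foldl_cons]
    have hq : 0 ≤ q.1 := hpos q List.mem_cons_self
    have hstep := sel_step d p.1 p.2 q.1 q.2 hq h
    have hps : ∀ r ∈ ps, 0 ≤ r.1 := fun r hr => hpos r (List.mem_cons_of_mem _ hr)
    by_cases hge : q.1 ≥ p.1
    · rw [if_pos hge]
      have := ih (d.insert q.1 q.2) q ?_ hps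
      · exact this
      · simpa [if_pos hge] using hstep
    · rw [if_neg hge]
      have := ih (d.insert q.1 q.2) p ?_ hps
      · exact this
      · simpa [if_neg hge] using hstep

lemma sel_final (d : PySem.Dict Int (List Nat)) (bw : Int) (b : List Nat) (h : GoodSel d bw b) :
    (match PySem.List.max? d.keys (fun x => x) with
     | none => []
     | some mk =>
       match d.get? mk with
       | none => []
       | some case => case.map (fun x => (x : Int) + 1))
      = b.map (fun i => (i : Int) + 1) := by
  rcases h with ⟨rfl, rfl, rfl⟩ | ⟨hnd, hbw, hmax, hget⟩
  · have : PySem.List.max? (PySem.Dict.empty : PySem.Dict Int (List Nat)).keys (fun x => x) = none := by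
      decide
    rw [this]
    simp
  · rcases hmk : PySem.List.max? d.keys (fun x => x) with _ | mk
    · rw [PySem.List.max?_eq_none_iff] at hmk
      rw [hmk] at hbw
      cases hbw
    · have h1 : mk ∈ d.keys := PySem.List.max?_mem hmk
      have h2 : ∀ y ∈ d.keys, y ≤ mk := PySem.List.max?_isMax hmk
      have hmb : mk = bw := le_antisymm (hmax mk h1) (h2 bw hbw)
      subst hmb
      simp [hget]

lemma foldl_range_two {α β γ : Type} (l : List α) (f : α → γ) (d₀ : α) (d₁ : γ)
    (F : β → α → γ → β) (init : β) :
    (List.range l.length).foldl (fun acc i => F acc (l.getD i d₀) ((l.map f).getD i d₁)) init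
      = l.foldl (fun acc x => F acc x (f x)) init := by
  induction l using List.reverseRecOn with
  | nil => simp
  | append_singleton l x ih =>
    rw [List.length_append, List.length_singleton, List.range_succ, List.foldl_append,
      List.foldl_append]
    have hcongr : (List.range l.length).foldl
        (fun acc i => F acc ((l ++ [x]).getD i d₀) (((l ++ [x]).map f).getD i d₁)) init
        = (List.range l.length).foldl
        (fun acc i => F acc (l.getD i d₀) ((l.map f).getD i d₁)) init := by
      apply PySem.List.foldl_congr_mem
      intro acc i hi
      have hi' : i < l.length := List.mem_range.mp hi
      rw [List.getD_eq_getElem?_getD, List.getD_eq_getElem?_getD,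
        List.getD_eq_getElem?_getD, List.getD_eq_getElem?_getD,
        List.map_append, List.getElem?_append_left hi', List.getElem?_append_left (by simpa using hi')]
    rw [hcongr, ih]
    simp

lemma main_eq (dice : List (List Int)) : solution dice = solution_alt dice := by
  unfold solution solution_alt
  simp only [List.length_map]
  have hrw := foldl_range_two (PySem.List.combinations (List.range dice.length) (dice.length / 2))
      (fun c => (List.range dice.length).filter (fun j => decide (j ∉ c))) [] []
      (fun (acc : PySem.Dict Int (List Nat)) (case ncase : List Nat) => acc.insert
        (((pyProduct (case.map (fun t => (dice.map (fun d => PySem.List.sorted d (fun x => x) false)).getD t []))).map List.sum).map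
          (fun s => (PySem.List.bisectLeft
            (PySem.List.sorted ((pyProduct (ncase.map (fun t => (dice.map (fun d => PySem.List.sorted d (fun x => x) false)).getD t []))).map List.sum) (fun x => x) false)
            s : Int))).sum
        case)
      PySem.Dict.empty
  rw [hrw]
  have hcongrA := PySem.List.foldl_congr_mem
    (PySem.List.combinations (List.range dice.length) (dice.length / 2))
    (fun (acc : PySem.Dict Int (List Nat)) (case : List Nat) => acc.insert
      (((pyProduct (case.map (fun t => (dice.map (fun d => PySem.List.sorted d (fun x => x) false)).getD t []))).map List.sum).map
        (fun s => (PySem.List.bisectLeft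
          (PySem.List.sorted ((pyProduct (((List.range dice.length).filter (fun j => decide (j ∉ case))).map (fun t => (dice.map (fun d => PySem.List.sorted d (fun x => x) false)).getD t []))).map List.sum) (fun x => x) false)
          s : Int))).sum
      case)
    (fun (acc : PySem.Dict Int (List Nat)) (case : List Nat) => acc.insert
      (countWins (distOf (case.map (fun i => dice.getD i [])))
        (distOf (((List.range dice.length).filter (fun j => decide (j ∉ case))).map (fun i => dice.getD i []))))
      case)
    PySem.Dict.empty
    (fun acc case _ => by beta_reduce; rw [wins_eq dice case ((List.range dice.length).filter (fun j => decide (j ∉ case)))])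
  rw [hcongrA]
  have hA2 : (PySem.List.combinations (List.range dice.length) (dice.length / 2)).foldl
      (fun (acc : PySem.Dict Int (List Nat)) (case : List Nat) => acc.insert
        (countWins (distOf (case.map (fun i => dice.getD i [])))
          (distOf (((List.range dice.length).filter (fun j => decide (j ∉ case))).map (fun i => dice.getD i []))))
        case)
      PySem.Dict.empty
      = (((PySem.List.combinations (List.range dice.length) (dice.length / 2)).map
          (fun c : List Nat => (countWins (distOf (c.map (fun i => dice.getD i [])))
        (distOf (((List.range dice.length).filter (fun j => decide (j ∉ c))).map (fun i => dice.getD i []))), c))).foldl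
        (fun (d : PySem.Dict Int (List Nat)) q => d.insert q.1 q.2) PySem.Dict.empty) := by
    rw [List.foldl_map]
  have hB2 : (PySem.List.combinations (List.range dice.length) (dice.length / 2)).foldl
      (fun (best : Int × List Nat) (case : List Nat) =>
        if countWins (distOf (case.map (fun i => dice.getD i [])))
            (distOf (((List.range dice.length).filter (fun i => decide (i ∉ case))).map (fun i => dice.getD i []))) ≥ best.1
        then (countWins (distOf (case.map (fun i => dice.getD i [])))
            (distOf (((List.range dice.length).filter (fun i => decide (i ∉ case))).map (fun i => dice.getD i []))), case)
        else best)
      ((-1 : Int), ([] : List Nat))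
      = (((PySem.List.combinations (List.range dice.length) (dice.length / 2)).map
          (fun c : List Nat => (countWins (distOf (c.map (fun i => dice.getD i [])))
        (distOf (((List.range dice.length).filter (fun j => decide (j ∉ c))).map (fun i => dice.getD i []))), c))).foldl
        (fun (p q : Int × List Nat) => if q.1 ≥ p.1 then q else p) ((-1 : Int), ([] : List Nat))) := by
    rw [List.foldl_map]
  rw [hA2, hB2]
  have hpos : ∀ q ∈ (PySem.List.combinations (List.range dice.length) (dice.length / 2)).map
      (fun c : List Nat => (countWins (distOf (c.map (fun i => dice.getD i [])))
        (distOf (((List.range dice.length).filter (fun j => decide (j ∉ c))).map (fun i => dice.getD i []))), c)), 0 ≤ q.1 := by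
    intro q hq
    rcases List.mem_map.mp hq with ⟨c, _, rfl⟩
    exact countWins_nonneg _ _ _ _ (distOf_spec _) (distOf_spec _)
  have hsel := sel_fold _ PySem.Dict.empty ((-1 : Int), ([] : List Nat)) (Or.inl ⟨rfl, rfl, rfl⟩) hpos
  exact sel_final _ _ _ hsel

-- ===== VERDICT (by name: the statement is the Claim_ definition above) =====
theorem solution_spec : Claim_equal_solution := by
  intro dice _
  unfold Spec_solution
  exact main_eq dice
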